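-- pv_equiv track=rewrite | github.com/amsyskov/bci | MD/Gyro.py | get_folder
-- ===== SOURCE A (Python) =====
-- def get_folder(path):
--     slash = 0
--     for i in range(len(path) - 1, -1, -1):
--         if (path[i] == '/'):
--             slash+=1
--
--     path2folder=''
--     for i in range(len(path)):
--         if (path[i] == '/'):
--             slash-=1
--         if (slash==0):
--             break
--         path2folder+=path[i]
--
--     return path2folder
--
--
--     name = ''
--     for i in range(len(reverse_name) - 1, -1, -1):
--         name += reverse_name[i]
--     return name
-- ===== SOURCE B (Python) =====
-- def get_folder(path):
--     return '/'.join(path.split('/')[:-1])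
-- ===== Notes on version B (the rewrite author's own statement) =====
-- stated objective: faster
-- what changed: Replaces A's two character-level passes (count separators, then copy characters one by one with string concatenation) by splitting the path into segments on the separator, dropping the last segment and rejoining.
import Mathlib
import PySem

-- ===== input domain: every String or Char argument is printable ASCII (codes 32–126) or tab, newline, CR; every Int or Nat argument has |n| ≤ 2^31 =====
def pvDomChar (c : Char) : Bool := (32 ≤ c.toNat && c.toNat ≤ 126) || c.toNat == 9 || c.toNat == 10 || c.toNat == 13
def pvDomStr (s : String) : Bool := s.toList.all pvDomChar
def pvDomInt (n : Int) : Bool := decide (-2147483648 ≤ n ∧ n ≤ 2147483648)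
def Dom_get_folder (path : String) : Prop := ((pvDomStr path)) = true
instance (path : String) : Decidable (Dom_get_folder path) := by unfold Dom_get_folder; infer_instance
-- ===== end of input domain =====

-- B replaces A's two slash-counting character loops by split-on-'/' / drop last segment / rejoin (idiomatic; return value only).

-- ===== PORT A =====
-- second loop of A (has a break): structural recursion over the remaining characters,
-- carrying the slash counter and the accumulated prefix exactly as A does
def getFolderLoop : List Char → Int → List Char → List Char
  | [], _, acc => acc
  | c :: rest, slash, acc =>
      let slash' := if c == '/' then slash - 1 else slash
      if slash' = 0 then acc else getFolderLoop rest slash' (acc ++ [c])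

def get_folder (path : String) : String :=
  let cs := path.toList
  -- first loop: count '/' over range(len(path)-1, -1, -1)
  let slash := (PySem.List.pyRange (PySem.List.len cs - 1) (-1) (-1)).foldl
      (fun slash i => if PySem.List.pyGetD cs i ' ' == '/' then slash + 1 else slash) (0 : Int)
  String.ofList (getFolderLoop cs slash [])

-- ===== PORT B =====
-- '/'.join(path.split('/')[:-1])
def get_folder_alt (path : String) : String :=
  String.ofList (PySem.Chars.join ['/']
    (PySem.List.slice (PySem.Chars.splitOn path.toList ['/']) none (some (-1))))

-- ===== PRECONDITION & SPEC =====
def Spec_get_folder (path : String) (out : String) : Prop := out = get_folder_alt path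
instance (path : String) (out : String) : Decidable (Spec_get_folder path out) := by unfold Spec_get_folder; infer_instance

-- ===== CLAIM (what is proved, stated in full; the proofs are below) =====
def Claim_equal_get_folder : Prop := ∀ (path : String), Dom_get_folder path → Spec_get_folder path (get_folder path)

-- ===== LEMMAS AND PROOFS =====

-- structural reference form of PySem.Chars.splitOn for the one-character separator '/'
def mySplit : List Char → List Char → List (List Char)
  | pre, [] => [pre]
  | pre, c :: rest => if c == '/' then pre :: mySplit [] rest else mySplit (pre ++ [c]) rest

lemma splitOn_go_eq (fuel : Nat) (l cur : List Char) (acc : List (List Char))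
    (h : l.length < fuel) :
    PySem.Chars.splitOn.go ['/'] fuel l cur acc = acc.reverse ++ mySplit cur.reverse l := by
  induction fuel generalizing l cur acc with
  | zero => omega
  | succ fuel ih =>
    cases l with
    | nil => simp [PySem.Chars.splitOn.go, mySplit]
    | cons c rest =>
      by_cases hc : c = '/'
      · subst hc
        simp only [PySem.Chars.splitOn.go]
        rw [if_pos (by simp [List.isPrefixOf])]
        rw [ih _ _ _ (by simpa using Nat.lt_of_succ_lt_succ h)]
        simp [mySplit]
      · simp only [PySem.Chars.splitOn.go]
        rw [if_neg (by simp [List.isPrefixOf]; exact fun h' => hc h'.symm)]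
        rw [ih _ _ _ (by simpa using Nat.lt_of_succ_lt_succ h)]
        simp [mySplit, hc]

lemma splitOn_eq_mySplit (cs : List Char) :
    PySem.Chars.splitOn cs ['/'] = mySplit [] cs := by
  have := splitOn_go_eq (cs.length + 1) cs [] [] (by omega)
  simpa [PySem.Chars.splitOn] using this

lemma mySplit_ne_nil (pre l : List Char) : mySplit pre l ≠ [] := by
  induction l generalizing pre with
  | nil => simp [mySplit]
  | cons c rest ih => by_cases hc : c == '/' <;> simp [mySplit, hc, ih]

lemma mySplit_modifyHead (l pre : List Char) :
    mySplit pre l = (mySplit [] l).modifyHead (pre ++ ·) := by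
  induction l generalizing pre with
  | nil => simp [mySplit]
  | cons c rest ih =>
    by_cases hc : c == '/'
    · simp [mySplit, hc]
    · simp only [mySplit, hc, Bool.false_eq_true, not_false_eq_true, if_neg]
      rw [ih (pre ++ [c]), ih ([] ++ [c])]
      obtain ⟨p, ps, hps⟩ := List.exists_cons_of_ne_nil (mySplit_ne_nil [] rest)
      simp [hps]

lemma mySplit_no_slash (l pre : List Char) (h : l.countP (· == '/') = 0) :
    mySplit pre l = [pre ++ l] := by
  induction l generalizing pre with
  | nil => simp [mySplit]
  | cons c rest ih =>
    simp only [List.countP_cons] at h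
    by_cases hc : c == '/'
    · simp [hc] at h
    · simp only [mySplit, hc, Bool.false_eq_true, not_false_eq_true, if_neg]
      rw [ih (pre ++ [c]) (by omega)]
      simp

lemma mySplit_len_ge_two (l pre : List Char) (h : l.countP (· == '/') ≠ 0) :
    2 ≤ (mySplit pre l).length := by
  induction l generalizing pre with
  | nil => simp at h
  | cons c rest ih =>
    by_cases hc : c == '/'
    · have := List.length_pos_iff.mpr (mySplit_ne_nil ([] : List Char) rest)
      simp [mySplit, hc]; omega
    · simp only [List.countP_cons, hc] at h
      simp only [mySplit, hc, Bool.false_eq_true, not_false_eq_true, if_neg]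
      exact ih _ (by simpa using h)

lemma join_cons_head (c : Char) (p : List Char) (ps : List (List Char)) (hps : ps ≠ []) :
    PySem.Chars.join ['/'] (((c :: p) :: ps).dropLast)
      = c :: PySem.Chars.join ['/'] ((p :: ps).dropLast) := by
  obtain ⟨q, qs, rfl⟩ := List.exists_cons_of_ne_nil hps
  rw [List.dropLast_cons₂, List.dropLast_cons₂]
  cases h : (q :: qs).dropLast with
  | nil => simp [PySem.Chars.join_singleton]
  | cons r rs =>
    rw [PySem.Chars.join_cons_cons, PySem.Chars.join_cons_cons]
    simp

lemma loop_eq_join (cs : List Char) : ∀ acc : List Char,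
    getFolderLoop cs (cs.countP (· == '/') : Int) acc
      = acc ++ PySem.Chars.join ['/'] ((mySplit [] cs).dropLast) := by
  induction cs with
  | nil => intro acc; simp [getFolderLoop, mySplit, PySem.Chars.join_nil]
  | cons c rest ih =>
    intro acc
    by_cases hr : rest.countP (· == '/') = 0
    · -- the loop breaks immediately: result is acc on both sides
      by_cases hc : c == '/'
      · simp only [getFolderLoop, List.countP_cons, hc, if_true]
        rw [if_pos (by simp [hr])]
        rw [show mySplit [] (c :: rest) = [] :: mySplit [] rest by simp [mySplit, hc]]
        rw [mySplit_no_slash rest [] hr]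
        simp [PySem.Chars.join_singleton]
      · simp only [getFolderLoop, List.countP_cons, hc, Bool.false_eq_true, if_false, Nat.add_zero]
        rw [if_pos (by simp [hr])]
        rw [show mySplit [] (c :: rest) = mySplit ([] ++ [c]) rest by simp [mySplit, hc]]
        rw [mySplit_no_slash rest ([] ++ [c]) hr]
        simp [PySem.Chars.join_nil]
    · -- the loop continues
      obtain ⟨p, ps, hm⟩ := List.exists_cons_of_ne_nil (mySplit_ne_nil [] rest)
      have hlen := mySplit_len_ge_two rest [] hr
      rw [hm] at hlen
      have hps : ps ≠ [] := by
        cases ps with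
        | nil => simp at hlen
        | cons _ _ => simp
      by_cases hc : c == '/'
      · simp only [getFolderLoop, List.countP_cons, hc, if_true]
        rw [if_neg (by push_cast; omega)]
        rw [show ((rest.countP (· == '/') + 1 : Nat) : Int) - 1
              = ((rest.countP (· == '/') : Nat) : Int) by push_cast; ring]
        rw [ih (acc ++ [c])]
        rw [show mySplit [] (c :: rest) = [] :: mySplit [] rest by simp [mySplit, hc]]
        rw [hm, List.dropLast_cons₂]
        obtain ⟨r, rs, hd⟩ : ∃ r rs, (p :: ps).dropLast = r :: rs := by
          obtain ⟨q, qs, rfl⟩ := List.exists_cons_of_ne_nil hps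
          rw [List.dropLast_cons₂]
          exact ⟨p, _, rfl⟩
        rw [hd, PySem.Chars.join_cons_cons]
        have hc' : c = '/' := by simpa using hc
        subst hc'
        simp
      · simp only [getFolderLoop, List.countP_cons, hc, Bool.false_eq_true, if_false, Nat.add_zero]
        rw [if_neg (by omega)]
        rw [ih (acc ++ [c])]
        rw [show mySplit [] (c :: rest) = mySplit ([] ++ [c]) rest by simp [mySplit, hc]]
        rw [mySplit_modifyHead rest ([] ++ [c]), hm]
        simp only [List.modifyHead, List.nil_append, List.cons_append]
        rw [join_cons_head c p ps hps]
        simp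

lemma first_loop_eq_count (cs : List Char) :
    (PySem.List.pyRange (PySem.List.len cs - 1) (-1) (-1)).foldl
      (fun slash i => if PySem.List.pyGetD cs i ' ' == '/' then slash + 1 else slash) (0 : Int)
    = (cs.countP (· == '/') : Int) := by
  have h1 : PySem.List.pyRange (PySem.List.len cs - 1) (-1) (-1)
      = (PySem.List.pyRange 0 (PySem.List.len cs) 1).reverse := by
    have := PySem.List.pyRange_neg_one_eq_reverse (PySem.List.len cs - 1) (-1)
    simpa using this
  rw [h1, PySem.List.foldl_count_if, List.countP_reverse]
  have h2 : List.countP (fun i => PySem.List.pyGetD cs i ' ' == '/')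
      (PySem.List.pyRange 0 (PySem.List.len cs) 1) = List.countP (· == '/') cs := by
    have h3 := List.countP_map (p := (· == '/')) (f := fun j => PySem.List.pyGetD cs j ' ')
      (l := PySem.List.pyRange 0 (PySem.List.len cs))
    rw [PySem.List.map_pyGetD_pyRange_zero] at h3
    exact h3.symm
  rw [h2]
  simp

-- ===== VERDICT (by name: the statement is the Claim_ definition above) =====
theorem get_folder_spec : Claim_equal_get_folder := by
  intro path _
  unfold Spec_get_folder get_folder get_folder_alt
  simp only [first_loop_eq_count, loop_eq_join, PySem.List.slice_to_neg_one, splitOn_eq_mySplit]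
  simp
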